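-- pv_equiv track=rewrite | github.com/EasterScience/DuctVision | pipe_marker.py | _find_line_positions
-- ===== SOURCE A (Python) =====
-- def _find_line_positions(projection, threshold, min_gap=8):
--     positions = []
--     in_line = False
--     line_start = 0
--     for i in range(len(projection)):
--         if projection[i] > threshold:
--             if not in_line:
--                 line_start = i
--                 in_line = True
--         else:
--             if in_line:
--                 pos = (line_start + i) // 2
--                 if not positions or pos - positions[-1] > min_gap:
--                     positions.append(pos)
--                 in_line = False
--     if in_line:
--         pos = (line_start + len(projection) - 1) // 2
--         if not positions or pos - positions[-1] > min_gap:
--             positions.append(pos)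
--     return positions
-- ===== SOURCE B (Python) =====
-- def _find_line_positions(projection, threshold, min_gap=8):
--     # Edge detection: compare the above-threshold mask with a shifted copy of
--     # itself to find rising/falling edges, pair them up, then gap-filter midpoints.
--     above = [v > threshold for v in projection]
--     edges = list(zip(above, [False] + above))  # (current, previous); zip drops the extra
--     starts = [i for i, (a, p) in enumerate(edges) if a and not p]
--     ends = [i for i, (a, p) in enumerate(edges) if p and not a]
--     if len(starts) > len(ends):
--         ends = ends + [len(projection) - 1]
--     positions = []
--     for s, e in zip(starts, ends):
--         m = (s + e) // 2
--         if not positions or m - positions[-1] > min_gap: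
--             positions.append(m)
--     return positions
-- ===== Notes on version B (the rewrite author's own statement) =====
-- stated objective: alternative
-- what changed: Replaced A's stateful in_line scan by stateless edge detection: a boolean mask zipped with its own shifted copy yields rising-edge (starts) and falling-edge (ends) index lists via comprehensions, which are zipped into segments before the midpoint/min-gap filter pass.
import Mathlib
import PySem

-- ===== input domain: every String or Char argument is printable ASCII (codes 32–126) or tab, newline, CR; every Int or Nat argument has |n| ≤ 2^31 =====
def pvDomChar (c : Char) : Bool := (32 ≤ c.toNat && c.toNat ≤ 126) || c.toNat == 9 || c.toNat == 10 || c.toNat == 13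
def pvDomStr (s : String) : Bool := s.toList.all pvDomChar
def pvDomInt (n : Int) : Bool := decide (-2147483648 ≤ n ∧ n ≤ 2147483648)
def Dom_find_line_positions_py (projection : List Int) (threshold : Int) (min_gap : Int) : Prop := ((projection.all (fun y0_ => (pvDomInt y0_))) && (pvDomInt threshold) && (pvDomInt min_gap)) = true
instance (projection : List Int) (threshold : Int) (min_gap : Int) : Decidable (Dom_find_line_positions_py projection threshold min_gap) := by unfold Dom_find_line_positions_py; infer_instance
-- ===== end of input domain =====

-- B replaces A's stateful in_line scan by stateless edge detection on the above-threshold mask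
-- (rising/falling edges from the mask zipped with its shifted copy), then a midpoint/gap pass
-- (alternative decomposition, same cost).

-- ===== PORT A =====
def find_line_positions_py (projection : List Int) (threshold : Int) (min_gap : Int) : List Int :=
  let n : Int := PySem.List.len projection
  let st := (PySem.List.pyRange 0 n 1).foldl
    (fun (st : List Int × Bool × Int) i =>
      let positions := st.1
      let in_line := st.2.1
      let line_start := st.2.2
      if PySem.List.pyGetD projection i 0 > threshold then
        if !in_line then (positions, true, i) else (positions, in_line, line_start)
      else
        if in_line then
          let pos := PySem.Int.floordiv (line_start + i) 2
          (if positions.isEmpty || decide (pos - positions.getLastD 0 > min_gap) then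
             positions ++ [pos] else positions, false, line_start)
        else (positions, in_line, line_start))
    ([], false, 0)
  if st.2.1 then
    let pos := PySem.Int.floordiv (st.2.2 + n - 1) 2
    if st.1.isEmpty || decide (pos - st.1.getLastD 0 > min_gap) then st.1 ++ [pos] else st.1
  else st.1

-- ===== PORT B =====
def find_line_positions_py_alt (projection : List Int) (threshold : Int) (min_gap : Int) : List Int :=
  let above := projection.map (fun v => decide (v > threshold))
  let edges := above.zip (false :: above)
  let starts := (PySem.List.enumerate edges 0).filterMap
    (fun x => if x.2.1 && !x.2.2 then some x.1 else none)
  let ends := (PySem.List.enumerate edges 0).filterMap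
    (fun x => if x.2.2 && !x.2.1 then some x.1 else none)
  let ends2 := if starts.length > ends.length then ends ++ [PySem.List.len projection - 1] else ends
  (starts.zip ends2).foldl
    (fun positions se =>
      let m := PySem.Int.floordiv (se.1 + se.2) 2
      if positions.isEmpty || decide (m - positions.getLastD 0 > min_gap) then
        positions ++ [m] else positions)
    []

-- ===== PRECONDITION & SPEC =====
def Spec_find_line_positions_py (projection : List Int) (threshold : Int) (min_gap : Int) (out : List Int) : Prop := out = find_line_positions_py_alt projection threshold min_gap
instance (projection : List Int) (threshold : Int) (min_gap : Int) (out : List Int) : Decidable (Spec_find_line_positions_py projection threshold min_gap out) := by unfold Spec_find_line_positions_py; infer_instance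

-- ===== CLAIM (what is proved, stated in full; the proofs are below) =====
def Claim_equal_find_line_positions_py : Prop := ∀ (projection : List Int) (threshold : Int) (min_gap : Int), Dom_find_line_positions_py projection threshold min_gap → Spec_find_line_positions_py projection threshold min_gap (find_line_positions_py projection threshold min_gap)

-- ===== LEMMAS AND PROOFS =====

/-- The shared gap-filtered append step. -/
def pvG (min_gap : Int) (positions : List Int) (pos : Int) : List Int :=
  if positions.isEmpty || decide (pos - positions.getLastD 0 > min_gap) then positions ++ [pos]
  else positions

/-- A's loop step, over enumerated pairs. -/
def pvStepA (threshold min_gap : Int) (st : List Int × Bool × Int) (iv : Int × Int) :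
    List Int × Bool × Int :=
  if iv.2 > threshold then
    if !st.2.1 then (st.1, true, iv.1) else (st.1, st.2.1, st.2.2)
  else
    if st.2.1 then
      (pvG min_gap st.1 (PySem.Int.floordiv (st.2.2 + iv.1) 2), false, st.2.2)
    else (st.1, st.2.1, st.2.2)

/-- Segment-collection step (intermediate abstraction). -/
def pvStepB (threshold : Int) (st : List (Int × Int) × Option Int) (iv : Int × Int) :
    List (Int × Int) × Option Int :=
  if iv.2 > threshold then
    match st.2 with
    | none => (st.1, some iv.1)
    | some _ => st
  else
    match st.2 with
    | none => st
    | some s => (st.1 ++ [(s, iv.1)], none)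

/-- Midpoint / gap-filter pass over segments. -/
def pvEmit (min_gap : Int) (segs : List (Int × Int)) : List Int :=
  segs.foldl (fun positions se => pvG min_gap positions (PySem.Int.floordiv (se.1 + se.2) 2)) []

/-- Rising-edge indices of an enumerated list, recursively, with previous flag. -/
def pvStarts (threshold : Int) : List (Int × Int) → Bool → List Int
  | [], _ => []
  | iv :: t, p =>
      (if iv.2 > threshold ∧ p = false then [iv.1] else []) ++
        pvStarts threshold t (decide (iv.2 > threshold))

/-- Falling-edge indices of an enumerated list, recursively, with previous flag. -/
def pvEnds (threshold : Int) : List (Int × Int) → Bool → List Int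
  | [], _ => []
  | iv :: t, p =>
      (if ¬ iv.2 > threshold ∧ p = true then [iv.1] else []) ++
        pvEnds threshold t (decide (iv.2 > threshold))

theorem pvLoop_eq (threshold min_gap : Int) (l : List (Int × Int)) :
    ∀ (segs : List (Int × Int)) (o : Option Int) (ls : Int),
      (o = none ∨ o = some ls) →
      (l.foldl (pvStepA threshold min_gap) (pvEmit min_gap segs, o.isSome, ls)).1 =
          pvEmit min_gap (l.foldl (pvStepB threshold) (segs, o)).1 ∧
        (l.foldl (pvStepA threshold min_gap) (pvEmit min_gap segs, o.isSome, ls)).2.1 =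
          (l.foldl (pvStepB threshold) (segs, o)).2.isSome ∧
        ((l.foldl (pvStepB threshold) (segs, o)).2 = none ∨
          (l.foldl (pvStepB threshold) (segs, o)).2 =
            some (l.foldl (pvStepA threshold min_gap) (pvEmit min_gap segs, o.isSome, ls)).2.2) := by
  induction l with
  | nil =>
    intro segs o ls h
    rcases h with h | h <;> simp [h]
  | cons iv t ih =>
    intro segs o ls h
    simp only [List.foldl_cons]
    rcases h with h | h <;> subst h
    · by_cases hv : iv.2 > threshold
      · simpa [pvStepA, pvStepB, hv] using ih segs (some iv.1) iv.1 (Or.inr rfl)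
      · simpa [pvStepA, pvStepB, hv] using ih segs none ls (Or.inl rfl)
    · by_cases hv : iv.2 > threshold
      · simpa [pvStepA, pvStepB, hv] using ih segs (some ls) ls (Or.inr rfl)
      · have he : pvEmit min_gap (segs ++ [(ls, iv.1)]) =
            pvG min_gap (pvEmit min_gap segs) (PySem.Int.floordiv (ls + iv.1) 2) := by
          simp [pvEmit, List.foldl_append]
        have := ih (segs ++ [(ls, iv.1)]) none ls (Or.inl rfl)
        simpa [pvStepA, pvStepB, hv, he] using this

theorem pvPortA_eq (projection : List Int) (threshold min_gap : Int) :
    find_line_positions_py projection threshold min_gap =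
      (if ((PySem.List.enumerate projection 0).foldl (pvStepA threshold min_gap)
            ([], false, 0)).2.1 then
         pvG min_gap
           ((PySem.List.enumerate projection 0).foldl (pvStepA threshold min_gap)
             ([], false, 0)).1
           (PySem.Int.floordiv
             (((PySem.List.enumerate projection 0).foldl (pvStepA threshold min_gap)
                 ([], false, 0)).2.2 + PySem.List.len projection - 1) 2)
       else ((PySem.List.enumerate projection 0).foldl (pvStepA threshold min_gap)
              ([], false, 0)).1) := by
  have hen : PySem.List.enumerate projection 0 =
      (PySem.List.pyRange 0 (PySem.List.len projection) 1).map
        (fun j => (j, PySem.List.pyGetD projection j 0)) :=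
    PySem.List.enumerate_eq_map_pyRange projection 0
  simp only [find_line_positions_py, hen, List.foldl_map, pvStepA, pvG]

/-- Segment fold with trailing close equals zipping starts against ends padded by `m`. -/
theorem pvSeg_zip (threshold : Int) (l : List (Int × Int)) :
    ∀ (prev : Bool) (segs : List (Int × Int)) (s m : Int),
      (let r := l.foldl (pvStepB threshold) (segs, if prev then some s else none)
       r.1 ++ (match r.2 with | some u => [(u, m)] | none => [])) =
        segs ++ List.zip ((if prev then [s] else []) ++ pvStarts threshold l prev)
          (pvEnds threshold l prev ++ [m]) := by
  induction l with
  | nil =>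
    intro prev segs s m
    cases prev <;> simp [pvStarts, pvEnds]
  | cons iv t ih =>
    intro prev segs s m
    simp only [List.foldl_cons]
    by_cases hv : iv.2 > threshold <;> cases prev
    · -- prev = false, above: open a run at iv.1
      have := ih true segs iv.1 m
      simpa [pvStepB, pvStarts, pvEnds, hv] using this
    · -- prev = true, above: keep the run open
      have := ih true segs s m
      simpa [pvStepB, pvStarts, pvEnds, hv] using this
    · -- prev = false, below: nothing
      have := ih false segs s m
      simpa [pvStepB, pvStarts, pvEnds, hv] using this
    · -- prev = true, below: close the run at iv.1
      have := ih false (segs ++ [(s, iv.1)]) s m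
      simpa [pvStepB, pvStarts, pvEnds, hv, List.zip_cons_cons] using this

/-- Zipping against an extended right list changes nothing when the left is short enough. -/
theorem pvZip_trunc {α β : Type} (a : List α) :
    ∀ (b c : List β), a.length ≤ b.length → a.zip (b ++ c) = a.zip b := by
  induction a with
  | nil => intro b c _; simp
  | cons x t ih =>
    intro b c h
    cases b with
    | nil => simp at h
    | cons y u => simpa [List.zip_cons_cons] using ih u c (by simpa using h)

/-- The comprehension over the mask zipped with its shifted copy computes `pvStarts`. -/
theorem pvStarts_comp (threshold : Int) (l : List Int) :
    ∀ (off : Int) (p : Bool),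
      (PySem.List.enumerate
          ((l.map (fun v => decide (v > threshold))).zip
            (p :: l.map (fun v => decide (v > threshold)))) off).filterMap
        (fun x => if x.2.1 && !x.2.2 then some x.1 else none) =
        pvStarts threshold (PySem.List.enumerate l off) p := by
  induction l with
  | nil => intro off p; simp [PySem.List.enumerate_nil, pvStarts]
  | cons v t ih =>
    intro off p
    have hz : ((v :: t).map (fun v => decide (v > threshold))).zip
        (p :: (v :: t).map (fun v => decide (v > threshold))) =
        (decide (v > threshold), p) ::
          (t.map (fun v => decide (v > threshold))).zip
            (decide (v > threshold) :: t.map (fun v => decide (v > threshold))) := by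
      simp [List.zip_cons_cons]
    rw [hz]
    simp only [PySem.List.enumerate_cons, List.filterMap_cons]
    rw [ih (off + 1)]
    by_cases hv : v > threshold <;> cases p <;> simp [pvStarts, hv]

/-- The falling-edge comprehension computes `pvEnds`. -/
theorem pvEnds_comp (threshold : Int) (l : List Int) :
    ∀ (off : Int) (p : Bool),
      (PySem.List.enumerate
          ((l.map (fun v => decide (v > threshold))).zip
            (p :: l.map (fun v => decide (v > threshold)))) off).filterMap
        (fun x => if x.2.2 && !x.2.1 then some x.1 else none) =
        pvEnds threshold (PySem.List.enumerate l off) p := by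
  induction l with
  | nil => intro off p; simp [PySem.List.enumerate_nil, pvEnds]
  | cons v t ih =>
    intro off p
    have hz : ((v :: t).map (fun v => decide (v > threshold))).zip
        (p :: (v :: t).map (fun v => decide (v > threshold))) =
        (decide (v > threshold), p) ::
          (t.map (fun v => decide (v > threshold))).zip
            (decide (v > threshold) :: t.map (fun v => decide (v > threshold))) := by
      simp [List.zip_cons_cons]
    rw [hz]
    simp only [PySem.List.enumerate_cons, List.filterMap_cons]
    rw [ih (off + 1)]
    by_cases hv : v > threshold <;> cases p <;> simp [pvEnds, hv]

/-- `pvSeg_zip` specialised to the initial closed state. -/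
theorem pvSeg_zip0 (threshold : Int) (l : List (Int × Int)) (m : Int) :
    ((l.foldl (pvStepB threshold) ([], none)).1 ++
        (match (l.foldl (pvStepB threshold) ([], none)).2 with
         | some u => [(u, m)] | none => [])) =
      List.zip (pvStarts threshold l false) (pvEnds threshold l false ++ [m]) := by
  simpa using pvSeg_zip threshold l false [] 0 m

/-- Port B computes `pvEmit` of the zipped starts/ends with the trailing pad. -/
theorem pvPortB_eq (projection : List Int) (threshold min_gap : Int) :
    find_line_positions_py_alt projection threshold min_gap =
      pvEmit min_gap
        ((pvStarts threshold (PySem.List.enumerate projection 0) false).zip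
          (pvEnds threshold (PySem.List.enumerate projection 0) false ++
            [PySem.List.len projection - 1])) := by
  unfold find_line_positions_py_alt
  dsimp only
  rw [pvStarts_comp threshold projection 0 false, pvEnds_comp threshold projection 0 false]
  by_cases hlen : (pvStarts threshold (PySem.List.enumerate projection 0) false).length >
      (pvEnds threshold (PySem.List.enumerate projection 0) false).length
  · simp only [hlen, if_true]
    rfl
  · simp only [hlen, if_false]
    rw [pvZip_trunc _ _ _ (by omega)]
    rfl

-- ===== VERDICT (by name: the statement is the Claim_ definition above) =====
theorem find_line_positions_py_spec : Claim_equal_find_line_positions_py := by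
  intro projection threshold min_gap _
  unfold Spec_find_line_positions_py
  rw [pvPortA_eq, pvPortB_eq]
  obtain ⟨h1, h2, h3⟩ :=
    pvLoop_eq threshold min_gap (PySem.List.enumerate projection 0) [] none 0 (Or.inl rfl)
  have hinit : (pvEmit min_gap [], Option.isSome (none : Option Int), (0 : Int)) =
      (([] : List Int), false, (0 : Int)) := rfl
  rw [hinit] at h1 h2 h3
  have hseg := pvSeg_zip0 threshold (PySem.List.enumerate projection 0)
    (PySem.List.len projection - 1)
  cases hfold : ((PySem.List.enumerate projection 0).foldl (pvStepB threshold) ([], none)).2 with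
  | none =>
    rw [hfold] at h2
    simp only [Option.isSome_none] at h2
    rw [h2]
    simp only [Bool.false_eq_true, if_false]
    rw [h1]
    congr 1
    rw [hfold] at hseg
    simpa using hseg
  | some u =>
    rw [hfold] at h2 h3
    simp only [Option.isSome_some] at h2
    rw [h2]
    simp only [if_true]
    rcases h3 with h3 | h3
    · exact absurd h3 (by simp)
    have hu : u = ((PySem.List.enumerate projection 0).foldl (pvStepA threshold min_gap)
        ([], false, 0)).2.2 := by
      injection h3
    have harg : ((PySem.List.enumerate projection 0).foldl (pvStepA threshold min_gap)
          ([], false, 0)).2.2 + PySem.List.len projection - 1 =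
        ((PySem.List.enumerate projection 0).foldl (pvStepA threshold min_gap)
          ([], false, 0)).2.2 + (PySem.List.len projection - 1) := by ring
    rw [harg, h1]
    have he : pvG min_gap
        (pvEmit min_gap
          ((PySem.List.enumerate projection 0).foldl (pvStepB threshold) ([], none)).1)
        (PySem.Int.floordiv
          (((PySem.List.enumerate projection 0).foldl (pvStepA threshold min_gap)
              ([], false, 0)).2.2 + (PySem.List.len projection - 1)) 2) =
        pvEmit min_gap
          (((PySem.List.enumerate projection 0).foldl (pvStepB threshold) ([], none)).1 ++
            [(((PySem.List.enumerate projection 0).foldl (pvStepA threshold min_gap)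
                ([], false, 0)).2.2, PySem.List.len projection - 1)]) := by
      simp [pvEmit, List.foldl_append]
    rw [he]
    congr 1
    rw [hfold] at hseg
    rw [← hu]
    simpa using hseg
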